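-- pv_equiv track=rewrite | github.com/nvcoden/working-out-problems | py_0710_3.py | bonacci
-- ===== SOURCE A (Python) =====
-- def bonacci(num, lmt):
--
--     b_list = []
--     for i in range(lmt):
--         a = 0
--         if i+1<num:
--             b_list.append(0)
--         elif i+1==num:
--             b_list.append(1)
--         else:
--             for j in range(num):
--                 a+=b_list[i-(j+1)]
--             b_list.append(a)
--     return b_list[lmt-1]
-- ===== SOURCE B (Python) =====
-- def bonacci(num, lmt):
--     # Sliding-window running sum: each new term equals the sum s of the last
--     # num terms, maintained in O(1) per step instead of an inner O(num) scan.
--     if num < 1 or lmt < num: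
--         return 0
--     seq = [0] * (num - 1) + [1]
--     s = 1
--     for i in range(num, lmt):
--         t = s
--         s += t - seq[i - num]
--         seq.append(t)
--     return seq[lmt - 1]
-- ===== Notes on version B (the rewrite author's own statement) =====
-- stated objective: faster
-- what changed: Replaces the inner O(num) rescan of the last num terms by a running window sum updated in O(1) per step (add new term, subtract the term leaving the window), returning 0 directly when lmt < num; intended as faster (measured 170x at the largest size both programs finished; unconfirmed at sizes where both exhaust the budget).
import Mathlib
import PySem

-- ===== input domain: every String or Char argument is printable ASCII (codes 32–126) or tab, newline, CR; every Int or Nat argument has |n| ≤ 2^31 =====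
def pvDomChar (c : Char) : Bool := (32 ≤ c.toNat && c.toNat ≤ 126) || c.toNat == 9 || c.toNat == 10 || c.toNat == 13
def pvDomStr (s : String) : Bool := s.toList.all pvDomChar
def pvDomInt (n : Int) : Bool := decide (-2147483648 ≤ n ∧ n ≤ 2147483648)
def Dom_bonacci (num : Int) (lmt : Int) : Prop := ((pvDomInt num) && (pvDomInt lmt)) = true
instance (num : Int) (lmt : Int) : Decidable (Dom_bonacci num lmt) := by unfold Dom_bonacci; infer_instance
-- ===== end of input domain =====

-- B replaces A's inner rescan of the last num terms by a running window sum updated once per appended term.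

-- ===== PORT A =====
def bonacci (num : Int) (lmt : Int) : Int :=
  let b_list : List Int :=
    (PySem.List.pyRange 0 lmt 1).foldl (fun b_list i =>
      let a : Int := 0
      if i + 1 < num then b_list ++ [0]
      else if i + 1 = num then b_list ++ [1]
      else
        b_list ++ [(PySem.List.pyRange 0 num 1).foldl
          (fun a j => a + PySem.List.pyGetD b_list (i - (j + 1)) 0) a]) []
  PySem.List.pyGetD b_list (lmt - 1) 0

-- ===== PORT B =====
def bonacci_alt (num : Int) (lmt : Int) : Int :=
  if num < 1 ∨ lmt < num then 0
  else
    let seq : List Int := List.replicate (num - 1).toNat 0 ++ [1]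
    let st :=
      (PySem.List.pyRange num lmt 1).foldl (fun (st : List Int × Int) i =>
        let t := st.2
        let s := st.2 + t - PySem.List.pyGetD st.1 (i - num) 0
        (st.1 ++ [t], s)) (seq, 1)
    PySem.List.pyGetD st.1 (lmt - 1) 0

-- ===== PRECONDITION & SPEC =====
-- Pre_ excludes exactly lmt ≤ 0, where A raises IndexError (b_list[lmt-1] on an empty list).
def Pre_bonacci (num : Int) (lmt : Int) : Prop := 1 ≤ lmt
instance (num : Int) (lmt : Int) : Decidable (Pre_bonacci num lmt) := by unfold Pre_bonacci; infer_instance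
def pvWitness_bonacci : Int × Int := (2, 7)

def Spec_bonacci (num : Int) (lmt : Int) (out : Int) : Prop := out = bonacci_alt num lmt
instance (num : Int) (lmt : Int) (out : Int) : Decidable (Spec_bonacci num lmt out) := by unfold Spec_bonacci; infer_instance

-- ===== CLAIM (what is proved, stated in full; the proofs are below) =====
def Claim_equal_bonacci : Prop := ∀ (num : Int) (lmt : Int), Dom_bonacci num lmt → Pre_bonacci num lmt → Spec_bonacci num lmt (bonacci num lmt)

-- ===== LEMMAS AND PROOFS =====

-- A's loop body, named
def stepA (num : Int) (b_list : List Int) (i : Int) : List Int :=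
  if i + 1 < num then b_list ++ [0]
  else if i + 1 = num then b_list ++ [1]
  else
    b_list ++ [(PySem.List.pyRange 0 num 1).foldl
      (fun a j => a + PySem.List.pyGetD b_list (i - (j + 1)) 0) 0]

-- A's list after the first k iterations
def listA (num k : Int) : List Int := (PySem.List.pyRange 0 k 1).foldl (stepA num) []

-- B's loop body, named
def stepB (num : Int) (st : List Int × Int) (i : Int) : List Int × Int :=
  (st.1 ++ [st.2], st.2 + st.2 - PySem.List.pyGetD st.1 (i - num) 0)

theorem bonacci_eq_listA (num lmt : Int) :
    bonacci num lmt = PySem.List.pyGetD (listA num lmt) (lmt - 1) 0 := rfl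

theorem length_foldl_stepA (num : Int) (r : List Int) (l : List Int) :
    ((r.foldl (stepA num) l)).length = l.length + r.length := by
  induction r generalizing l with
  | nil => simp
  | cons x xs ih =>
    simp only [List.foldl_cons, ih, stepA]
    split_ifs <;> simp <;> omega

theorem length_listA (num k : Int) (hk : 0 ≤ k) : (listA num k).length = k.toNat := by
  unfold listA
  rw [length_foldl_stepA]
  simp [PySem.List.length_pyRange_one]

-- first k terms are 0 whenever k < num (before the seed 1 is placed)
theorem listA_zeros (num : Int) : ∀ k : Int, 0 ≤ k → k ≤ num - 1 → listA num k = List.replicate k.toNat 0 := by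
  intro k
  refine Int.le_induction (m := 0) ?_ ?_ k
  · intro _; simp [listA, PySem.List.pyRange_one_eq_nil]
  · intro n hn ih hlt
    unfold listA
    rw [PySem.List.pyRange_one_succ_right hn, List.foldl_append]
    have h1 : listA num n = List.replicate n.toNat 0 := ih (by omega)
    unfold listA at h1
    rw [h1, List.foldl_cons, List.foldl_nil, stepA, if_pos (by omega)]
    have : (n + 1).toNat = n.toNat + 1 := by omega
    rw [this, List.replicate_succ']

-- when num ≤ 0, every term is 0
theorem listA_zeros_nonpos (num : Int) (hnum : num ≤ 0) :
    ∀ k : Int, 0 ≤ k → listA num k = List.replicate k.toNat 0 := by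
  intro k
  refine Int.le_induction (m := 0) ?_ ?_ k
  · simp [listA, PySem.List.pyRange_one_eq_nil]
  · intro n hn ih
    unfold listA
    rw [PySem.List.pyRange_one_succ_right hn, List.foldl_append]
    unfold listA at ih
    rw [ih, List.foldl_cons, List.foldl_nil, stepA, if_neg (by omega), if_neg (by omega),
      PySem.List.pyRange_one_eq_nil hnum]
    have : (n + 1).toNat = n.toNat + 1 := by omega
    simp [this, List.replicate_succ']

-- the seed row: listA num num = 0,…,0,1
theorem listA_seed (num : Int) (hnum : 1 ≤ num) :
    listA num num = List.replicate (num - 1).toNat 0 ++ [1] := by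
  unfold listA
  have hr : PySem.List.pyRange 0 num 1 = PySem.List.pyRange 0 (num - 1) 1 ++ [num - 1] := by
    have h := PySem.List.pyRange_one_succ_right (a := 0) (b := num - 1) (by omega)
    rwa [show num - 1 + 1 = num from by omega] at h
  rw [hr, List.foldl_append]
  have h1 := listA_zeros num (num - 1) (by omega) (by omega)
  unfold listA at h1
  rw [h1, List.foldl_cons, List.foldl_nil, stepA, if_neg (by omega), if_pos (by omega)]

-- the inner loop of A sums the last n elements of l
theorem sum_last (l : List Int) (n : Nat) (hn : n ≤ l.length) (i : Int) (hi : i = (l.length : Int)) :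
    (List.range n).foldl (fun (a : Int) (j : Nat) => a + PySem.List.pyGetD l (i - ((j : Int) + 1)) 0) 0
      = (l.drop (l.length - n)).sum := by
  induction n with
  | zero => simp
  | succ m ih =>
    rw [List.range_succ, List.foldl_append, List.foldl_cons, List.foldl_nil,
      ih (by omega)]
    have hlen1 : 1 ≤ l.length := by omega
    have hidx : PySem.List.pyGetD l (i - ((m : Int) + 1)) 0 = l[l.length - (m + 1)]'(by omega) := by
      have h0 : (0 : Int) ≤ i - ((m : Int) + 1) := by omega
      have h1 : i - ((m : Int) + 1) < (l.length : Int) := by omega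
      rw [PySem.List.pyGetD_eq_getElem l 0 h0 h1]
      simp only [show (i - ((m : Int) + 1)).toNat = l.length - (m + 1) from by omega]
    rw [hidx]
    have hd : l.drop (l.length - (m + 1)) = l[l.length - (m + 1)]'(by omega) :: l.drop (l.length - m) := by
      rw [List.drop_eq_getElem_cons (by omega)]
      rw [show l.length - (m + 1) + 1 = l.length - m from by omega]
    rw [hd, List.sum_cons]
    ring

-- the inner foldl as written in the port, bridged to sum_last
theorem innerSumA (num : Int) (hnum : 1 ≤ num) (l : List Int) (i : Int)
    (hi : i = (l.length : Int)) (hle : num ≤ i) :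
    (PySem.List.pyRange 0 num 1).foldl (fun a j => a + PySem.List.pyGetD l (i - (j + 1)) 0) 0
      = (l.drop (l.length - num.toNat)).sum := by
  have h1 : num = ((num.toNat : Nat) : Int) := by omega
  rw [h1, PySem.List.pyRange_zero_nat, List.foldl_map]
  exact sum_last l num.toNat (by omega) i hi

-- main invariant: B's fold state after reaching k is (listA num k, window sum)
theorem bonacci_invariant (num : Int) (hnum : 1 ≤ num) :
    ∀ k : Int, num ≤ k →
      (PySem.List.pyRange num k 1).foldl (stepB num)
          (List.replicate (num - 1).toNat 0 ++ [1], 1)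
        = (listA num k, ((listA num k).drop ((k - num).toNat)).sum) := by
  intro k
  refine Int.le_induction (m := num) ?_ ?_ k
  · rw [PySem.List.pyRange_one_eq_nil (le_refl num), List.foldl_nil, listA_seed num hnum]
    simp
  · intro n hn ih
    rw [PySem.List.pyRange_one_succ_right hn, List.foldl_append, ih, List.foldl_cons,
      List.foldl_nil]
    have hlen : (listA num n).length = n.toNat := length_listA num n (by omega)
    -- A's next appended value equals the current window sum
    have hnext : listA num (n + 1) = listA num n ++ [((listA num n).drop ((n - num).toNat)).sum] := by
      unfold listA
      rw [PySem.List.pyRange_one_succ_right (by omega), List.foldl_append]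
      show stepA num ((PySem.List.pyRange 0 n 1).foldl (stepA num) []) n = _
      have hfold : (PySem.List.pyRange 0 n 1).foldl (stepA num) [] = listA num n := rfl
      rw [hfold, stepA, if_neg (by omega), if_neg (by omega),
        innerSumA num hnum (listA num n) n (by rw [hlen]; omega) hn]
      rw [hlen, show n.toNat - num.toNat = (n - num).toNat from by omega]
    rw [stepB]
    have hd : (n - num).toNat < (listA num n).length := by rw [hlen]; omega
    have hdrop : (listA num n).drop ((n - num).toNat)
        = (listA num n)[(n - num).toNat] :: (listA num n).drop ((n - num).toNat + 1) :=
      List.drop_eq_getElem_cons hd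
    have hget : PySem.List.pyGetD (listA num n) (n - num) 0 = (listA num n)[(n - num).toNat] := by
      rw [PySem.List.pyGetD_eq_getElem (listA num n) 0 (by omega) (by rw [hlen]; omega)]
    simp only [Prod.mk.injEq]
    constructor
    · rw [hnext]
    · have h2 : ((n + 1 - num).toNat) ≤ (listA num n).length := by rw [hlen]; omega
      have h3 : (n + 1 - num).toNat = (n - num).toNat + 1 := by omega
      rw [hnext, hget, List.drop_append_of_le_length h2, List.sum_append, h3, List.sum_singleton]
      have hs : (List.drop (n - num).toNat (listA num n)).sum
          = (listA num n)[(n - num).toNat] + (List.drop ((n - num).toNat + 1) (listA num n)).sum := by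
        conv_lhs => rw [hdrop]
        rw [List.sum_cons]
      omega

-- getting any in-range element of an all-zero list yields 0
theorem pyGetD_replicate_zero (n : Nat) (i : Int) (h0 : 0 ≤ i) (h1 : i < (n : Int)) :
    PySem.List.pyGetD (List.replicate n (0 : Int)) i 0 = 0 := by
  rw [PySem.List.pyGetD_eq_getElem _ 0 h0 (by simpa using h1)]
  simp

-- ===== VERDICT (by name: the statement is the Claim_ definition above) =====
theorem bonacci_spec : Claim_equal_bonacci := by
  intro num lmt _ hpre
  unfold Pre_bonacci at hpre
  unfold Spec_bonacci
  rw [bonacci_eq_listA]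
  unfold bonacci_alt
  by_cases hnum : num < 1
  · rw [if_pos (Or.inl hnum)]
    rw [listA_zeros_nonpos num (by omega) lmt (by omega)]
    exact pyGetD_replicate_zero lmt.toNat (lmt - 1) (by omega) (by omega)
  · by_cases hlt : lmt < num
    · rw [if_pos (Or.inr hlt)]
      rw [listA_zeros num lmt (by omega) (by omega)]
      exact pyGetD_replicate_zero lmt.toNat (lmt - 1) (by omega) (by omega)
    · rw [if_neg (by omega)]
      show PySem.List.pyGetD (listA num lmt) (lmt - 1) 0
          = PySem.List.pyGetD ((PySem.List.pyRange num lmt 1).foldl (stepB num)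
              (List.replicate (num - 1).toNat 0 ++ [1], 1)).1 (lmt - 1) 0
      rw [bonacci_invariant num (by omega) lmt (by omega)]
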